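-- pv_equiv track=rewrite | github.com/gabriela-castro-s/Observables | calculadora_imaginarios.py | sumacompvector
-- ===== SOURCE A (Python) =====
-- def suma (num1, num2):
--     """Funcion que suma dos numeros imaginarios, los numeros deben ser parejas ordenadas
--     (list 1D, list 1D) -> list 1D"""
--     ans1 = num1[0] + num2[0]
--     ans2 = num1[1] + num2[1]
--     return (ans1, ans2)
--
-- def sumacompvector(v1):
--     """Funcion que suma los componentes de un vector, el proposito de esta funcion es facilitar la funcion accionmatrizvector
--         (list 1D) -> list 1D"""
--     if len(v1) < 2:
--         return v1[0]
--     elif len(v1) == 2: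
--         ans = suma(v1[0], v1[1])
--         return ans
--     else:
--         ans = suma(v1[0], v1[1])
--         for i in range(2, len(v1)):
--             ans = suma(ans, v1[i])
--         return ans
-- ===== SOURCE B (Python) =====
-- def sumacompvector(v1):
--     real = sum(p[0] for p in v1)
--     imag = sum(p[1] for p in v1)
--     return (real, imag)
-- ===== Notes on version B (the rewrite author's own statement) =====
-- stated objective: simpler
-- what changed: Replaced the 3-way length branching with a sequential pair-accumulator loop by two direct per-component sums over the whole list; Pre_ excludes only the empty list, on which A raises IndexError.
import Mathlib
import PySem

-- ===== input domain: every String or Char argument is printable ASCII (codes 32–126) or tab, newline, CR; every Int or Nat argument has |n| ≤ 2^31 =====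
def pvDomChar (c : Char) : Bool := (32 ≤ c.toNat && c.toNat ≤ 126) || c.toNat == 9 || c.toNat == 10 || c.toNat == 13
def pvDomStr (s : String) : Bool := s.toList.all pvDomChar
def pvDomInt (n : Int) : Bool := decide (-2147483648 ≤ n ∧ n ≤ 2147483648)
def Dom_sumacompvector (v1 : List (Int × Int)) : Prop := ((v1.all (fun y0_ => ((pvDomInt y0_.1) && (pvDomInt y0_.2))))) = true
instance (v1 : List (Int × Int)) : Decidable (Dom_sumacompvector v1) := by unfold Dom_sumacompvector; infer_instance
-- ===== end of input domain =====

-- B replaces A's 3-way length branching with a sequential pair fold by two per-component sums (simpler).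

-- ===== PORT A =====
def suma (num1 num2 : Int × Int) : Int × Int := (num1.1 + num2.1, num1.2 + num2.2)

def sumacompvector (v1 : List (Int × Int)) : Int × Int :=
  if v1.length < 2 then
    (PySem.List.pyGet? v1 0).getD (0, 0)   -- v1[0]; none (IndexError on []) excluded by Pre_
  else if v1.length = 2 then
    suma (PySem.List.pyGetD v1 0 (0, 0)) (PySem.List.pyGetD v1 1 (0, 0))
  else
    -- ans = suma(v1[0], v1[1]); for i in range(2, len(v1)): ans = suma(ans, v1[i])
    (PySem.List.pyRange 2 v1.length 1).foldl
      (fun ans i => suma ans (PySem.List.pyGetD v1 i (0, 0)))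
      (suma (PySem.List.pyGetD v1 0 (0, 0)) (PySem.List.pyGetD v1 1 (0, 0)))

-- ===== PORT B =====
def sumacompvector_alt (v1 : List (Int × Int)) : Int × Int :=
  ((v1.map Prod.fst).sum, (v1.map Prod.snd).sum)

-- ===== PRECONDITION & SPEC =====
-- Pre_ excludes exactly the empty list, on which A raises IndexError (v1[0]).
def Pre_sumacompvector (v1 : List (Int × Int)) : Prop := v1 ≠ []
instance (v1 : List (Int × Int)) : Decidable (Pre_sumacompvector v1) := by unfold Pre_sumacompvector; infer_instance
def pvWitness_sumacompvector : (List (Int × Int)) := [(1, 2), (3, -4)]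

def Spec_sumacompvector (v1 : List (Int × Int)) (out : Int × Int) : Prop := out = sumacompvector_alt v1
instance (v1 : List (Int × Int)) (out : Int × Int) : Decidable (Spec_sumacompvector v1 out) := by unfold Spec_sumacompvector; infer_instance

-- ===== CLAIM (what is proved, stated in full; the proofs are below) =====
def Claim_equal_sumacompvector : Prop := ∀ (v1 : List (Int × Int)), Dom_sumacompvector v1 → Pre_sumacompvector v1 → Spec_sumacompvector v1 (sumacompvector v1)

-- ===== LEMMAS AND PROOFS =====

-- A's loop accumulates exactly the per-component sums of the remaining elements.
theorem foldl_suma (l : List (Int × Int)) (a : Int × Int) :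
    l.foldl suma a = (a.1 + (l.map Prod.fst).sum, a.2 + (l.map Prod.snd).sum) := by
  induction l generalizing a with
  | nil => simp
  | cons x xs ih => simp [ih, suma]; constructor <;> ring

-- The indexed range-loop over v1 (from index 2) equals the fold over v1.drop 2.
theorem range_loop_eq_drop (v1 : List (Int × Int)) (a : Int × Int) :
    (PySem.List.pyRange 2 v1.length 1).foldl
      (fun ans i => suma ans (PySem.List.pyGetD v1 i (0, 0))) a
    = (v1.drop 2).foldl suma a := by
  have key : ∀ (k : Nat) (w : List (Int × Int)) (a : Int × Int),
      (PySem.List.pyRange (k : Int) w.length 1).foldl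
        (fun ans i => suma ans (PySem.List.pyGetD w i (0, 0))) a
      = (w.drop k).foldl suma a := by
    intro k w
    induction h : w.length - k generalizing k with
    | zero =>
      intro a
      rw [PySem.List.pyRange]
      simp [show ¬ ((k:Int) < (w.length : Int)) by omega,
            List.drop_eq_nil_of_le (by omega : w.length ≤ k)]
    | succ n ih =>
      intro a
      have hlt : k < w.length := by omega
      rw [PySem.List.pyRange_one_cons (by exact_mod_cast hlt)]
      simp only [List.foldl_cons]
      have hget : PySem.List.pyGetD w (k : Int) (0, 0) = w[k]'hlt := by
        rw [PySem.List.pyGetD_natCast]; simp [hlt]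
      rw [hget]
      have hc : ((k : Int) + 1) = ((k + 1 : Nat) : Int) := by push_cast; ring
      rw [hc, ih (k + 1) (by omega) (suma a (w[k]'hlt))]
      conv_rhs => rw [List.drop_eq_getElem_cons hlt]
      rfl
  exact_mod_cast key 2 v1 a

-- ===== VERDICT (by name: the statement is the Claim_ definition above) =====
theorem sumacompvector_spec : Claim_equal_sumacompvector := by
  intro v1 _ hpre
  unfold Spec_sumacompvector sumacompvector sumacompvector_alt
  match v1 with
  | [] => exact absurd rfl hpre
  | [a] => simp [PySem.List.pyGet?, PySem.List.pyIdx?]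
  | [a, b] => simp [suma, PySem.List.pyGetD_ofNat']
  | a :: b :: c :: rest =>
    have hlen : ¬ ((a :: b :: c :: rest).length < 2) := by simp
    have hlen2 : ¬ ((a :: b :: c :: rest).length = 2) := by simp
    rw [if_neg hlen, if_neg hlen2, range_loop_eq_drop, foldl_suma]
    simp [suma, PySem.List.pyGetD_ofNat']
    refine ⟨by ring, by ring⟩
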